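/- GENERATED by tools/from_farm_form.py from prooffarm-gif/accepted/DGifDecompressLine.E/Proof.lean (a worked proof of the farm's unit `DGifDecompressLine.E`,
   accepted by the verdict) — do not edit. -/
import Gif.Spec.Units.DGifDecompressLine_E
import Gif.Spec.AllSegs

open X86 X86.User Asan ProgX.Base ProgX.Base.Spec Gif.Spec

set_option maxRecDepth 4000
set_option maxHeartbeats 4000000

/-!
  `DGifDecompressLine.E` (0x10709d … the `ret` at 0x1070b9, 9 instructions; dgif_lib.c:861 / 1003): THE EPILOGUE OF THE PROTECTED
  FUNCTION `DGifDecompressLine`. The recipe is that of farm.gif/worked/DGifGetWord.E (Gif/Spec/FrameCarry.lean §1, §2, §4):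
    1. the prelude: the entry assertion `Done` as walker facts; the shadow index register `r15` as a word VARIABLE `b` with bounds;
    2. the walk to the `ret` (the six pops and the return address are read through the shadow store by the walker itself);
    3. `stores1_index`: `hmem : s.mem = storesMem v.mem (base / 8) F.epilogue`;
    4. `after_epilogue` (`HeapInv` for the callers' frames, `GifOK`, `rem`), `epilogue_same` (`Returned.same`),
       `LZOK` over the shadow store (`storesMem_sameExcept` + `LZOK.sameExcept`: the store is in the shadow, pv on the heap);
    5. `Returned`, field by field.
-/

/-- The epilogue of `DGifDecompressLine` takes `Done` at 0x10709d to `Returned`. -/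
theorem Gif.Spec.Proved.DGifDecompressLine_E_ok : Gif.Spec.DGifDecompressLine_E.Statement := by
  intro Lay hLay μ hμ u₀ hcode H rest frames F R n e ret v hat
  -- 1. THE PRELUDE: the entry assertion `Done` = `Body` + the shadow index in `r15` + the result
  obtain ⟨hbody, hr15, hres⟩ := hat
  have he := hbody.entry
  v_entry he
  obtain ⟨henv, hlz0, hrdi, hrdx, hn, hbuf⟩ := hbody.pre
  -- what the walker reads of a segment's entry state: rip, rsp (as `c_rsp`), the registers kept, the text, DF / MXCSR
  have w_rip := hbody.rip
  have c_rsp : v.reg .rsp = e.reg .rsp - 200 := hbody.rsp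
  have w_kept : RegsKept [.rsp] v v := RegsKept.refl _ _
  have w_eq : Mem.EqOn ProgX.Base.L.textLo ProgX.Base.L.textHi u₀.mem v.mem := ProgX.Base.conv_code_eqOn hbody.code
  have hdf := (show abiInv _ from hbody.abi).1
  have hmx := (show abiInv _ from hbody.abi).2
  have hsse := ProgX.Base.sseOK_of_abiInv hbody.abi
  -- the slots the six pops (0x1070af … 0x1070b7) and the `ret` (0x1070b9) read
  have k_r15 : v.mem.readLE (e.reg .rsp - 8) 8 = (e.reg .r15).toNat := hbody.slot_r15
  have k_r14 : v.mem.readLE (e.reg .rsp - 16) 8 = (e.reg .r14).toNat := hbody.slot_r14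
  have k_r13 : v.mem.readLE (e.reg .rsp - 24) 8 = (e.reg .r13).toNat := hbody.slot_r13
  have k_r12 : v.mem.readLE (e.reg .rsp - 32) 8 = (e.reg .r12).toNat := hbody.slot_r12
  have k_rbp : v.mem.readLE (e.reg .rsp - 40) 8 = (e.reg .rbp).toNat := hbody.slot_rbp
  have k_rbx : v.mem.readLE (e.reg .rsp - 48) 8 = (e.reg .rbx).toNat := hbody.slot_rbx
  have k_ra : UInt64.ofNat (v.mem.readLE (e.reg .rsp) 8) = ret := hbody.slot_ra
  -- THE SHADOW INDEX REGISTER AS A VARIABLE `b` WITH BOUNDS: no `>>> 3` is in the walk's context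
  have e120 : (e.reg .rsp - 120).toNat = (e.reg .rsp).toNat - 120 := by u_omega
  obtain ⟨b, hb⟩ : ∃ b : Word, b = (e.reg .rsp - 120) >>> 3 := ⟨_, rfl⟩
  have hbn : b.toNat = ((e.reg .rsp).toNat - 120) / 8 := by
    rw [hb, Asan.toNat_shr3, e120]
  have hb1 : 0xE0000 ≤ b.toNat := by omega
  have hb2 : b.toNat + 8 ≤ 0x100000 := by omega
  have c_r15 : v.reg .r15 = b := by
    rw [hb]
    exact hr15
  clear hb hr15
  -- 2. THE WALK, from 0x10709d (the store that clears the frame's shadow) to the `ret` at 0x1070b9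
  u_walk hcode [hμ.vendor] span [ProgX.Base.L.textLo, ProgX.Base.L.textHi] side (v_side)
  -- 3. THE EPILOGUE'S STORE AS THE LAYOUT'S `storesMem`: the displacement as the walker prints it, granule offset, width, value
  have hepi : Gif.Frames.DGifDecompressLine.epilogue = [⟨0, 8, 0⟩] := rfl
  have hmem : s_1070b9.mem = storesMem v.mem (((e.reg .rsp).toNat - 120) / 8) Gif.Frames.DGifDecompressLine.epilogue := by
    rw [hepi, w_mem, ← hbn]
    exact stores1_index v.mem b 12582912 0 8 0 (by omega) (by decide) (by decide)
  have hin : ∀ s, s ∈ Gif.Frames.DGifDecompressLine.epilogue → s.idx + s.width ≤ 8 := by decide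
  clear w_mem
  -- 4. THE ENVIRONMENT behind the epilogue: the callers' frames, the clean stack ends above the return address
  obtain ⟨hinv2, hok2, hrem2⟩ := after_epilogue (top := (e.reg .rsp).toNat) (ro := 120) (Fl := Gif.Frames.DGifDecompressLine) rfl
    hbody.inv henv.ctx hbody.ok he_align he_top henv.heap.inv.frames_above
  -- the frame's shadow span leaves the footprint
  have hsame2 := epilogue_same (top := (e.reg .rsp).toNat) (ro := 120) (ro' := 56) (Fl := Gif.Frames.DGifDecompressLine) rfl rfl
    henv.heap.inv hbody.inv he_align hbody.same
  -- `LZOK` over the shadow store: the store lies in the shadow region (at or above C00000H), pv on the heap (below it)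
  have hpin := hbody.ok.owns.inside hbody.inv.heap (o := (F.pv, 24936)) (List.mem_cons_of_mem _ List.mem_cons_self)
  have hpv : F.pv + 24936 + 32 ≤ 0xC00000 := hpin.2.2.2.2
  clear hpin
  have hst : Mem.SameExcept
      [⟨0xC00000 + ((e.reg .rsp).toNat - 120) / 8, 0xC00000 + ((e.reg .rsp).toNat - 120) / 8 + 8⟩] v.mem
      (storesMem v.mem (((e.reg .rsp).toNat - 120) / 8) Gif.Frames.DGifDecompressLine.epilogue) :=
    storesMem_sameExcept v.mem _ 8 _ hin (by omega)
  have hlz2 : LZOK (storesMem v.mem (((e.reg .rsp).toNat - 120) / 8) Gif.Frames.DGifDecompressLine.epilogue) F.pv := by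
    refine hbody.lz.sameExcept hst (by omega) ?_
    intro w hw
    have ew := List.mem_singleton.mp hw
    rw [ew]
    right
    show F.pv + 48 ≤ 0xC00000 + ((e.reg .rsp).toNat - 120) / 8
    omega
  clear hst
  rw [← hmem] at hinv2 hok2 hrem2 hsame2 hlz2
  -- the result register `eax` is not touched by the epilogue
  have e_rax : s_1070b9.reg .rax = v.reg .rax := w_kept.get .rax rfl
  -- 5. `Returned`, field by field
  refine ReachVia.done ?_
  refine X86.User.Returned.mk w_rip w_rsp ?saved ?same (ProgX.Base.conv_code_in w_eq) ?abi ?post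
  case saved =>
    -- the six popped registers are the walker's facts
    intro r hr
    cases r <;> first
      | exact absurd hr (by decide)
      | (with_reducible assumption)
  case same =>
    simp only [X86.User.Spec.footprint, vspec]
    exact hsame2
  case abi =>
    -- DF and MXCSR by hand (`v_inv` is slow behind a walk with shadow stores)
    refine ProgX.Base.abiInv_of ?_ ?_
    · rw [w_flags]
      simp only [X86.User.df_setStatus]
      exact hdf
    · rw [w_mxcsr]
      exact hmx
  case post =>
    -- `Back` (the environment, the reader did not go back), `LZOK`, the result
    refine ⟨⟨hinv2, hok2, ?_⟩, hlz2, ?_⟩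
    · rw [hrem2]
      exact hbody.rem
    · unfold IsBool
      rw [e_rax]
      exact hres
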